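-- pv_equiv track=rewrite | github.com/robertyounghome/wordle-python | guess.py | produce_mask
-- ===== SOURCE A (Python) =====
-- from collections import Counter
--
-- def produce_mask(guess, word):
--     # Two collections (Counters) are used for comparisons
--     # Also set up a dummy 'xxxxx' mask to start.
--     word_letter_count = Counter(word)
--     guess_letter_count = Counter(guess)
--     guess_word_mask = ['x'] * len(guess)
--
--     # First update the mask denoting all equal letters with a G.
--     # Subtract from each Counter when a match is found.
--     for i, letter in enumerate(word):
--         if guess[i] == letter:
--             guess_word_mask[i] = 'G'
--             guess_letter_count[letter] -= 1
--             word_letter_count[letter] -= 1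
--
--     # Next for each item in the mask that remains an 'x', determine
--     # whether the mask should be updated to a 'Y' or 'B'. The Counter
--     # collections are used for this purpose. The guess and the word
--     # must both still contain unused letters for us to have a 'Y'.
--     # In other words, both the word and the guess must still contain
--     # the same unmatched letter to result in a 'Y' on the mask.
--     # Otherwise, just change the 'x' in the mask to a 'B'.
--
--     for i in range(len(guess)):
--         letter = guess[i]
--         if guess_word_mask[i] == 'x':
--             if guess_letter_count[letter] > 0 and \
--                 word_letter_count[letter] > 0:
--                 guess_word_mask[i] = 'Y'
--                 guess_letter_count[letter] -= 1
--                 word_letter_count[letter] -= 1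
--             else:
--                 guess_word_mask[i] = 'B'
--
--     return ''.join(guess_word_mask)
-- ===== SOURCE B (Python) =====
-- def produce_mask(guess, word):
--     # Closed-form per-position rule: a position is 'G' when it matches; otherwise it is
--     # 'Y' exactly when its rank among the non-green occurrences of its letter in the
--     # guess (left to right) fits inside the word's non-green supply of that letter.
--     def is_green(j):
--         return j < len(word) and guess[j] == word[j]
--
--     def budget(c):
--         return sum(1 for j in range(len(word)) if word[j] == c and not is_green(j))
--
--     out = []
--     for i in range(len(guess)):
--         c = guess[i]
--         if is_green(i):
--             out.append('G')
--         else: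
--             rank = sum(1 for j in range(i + 1) if guess[j] == c and not is_green(j))
--             out.append('Y' if rank <= budget(c) else 'B')
--     return ''.join(out)
-- ===== Notes on version B (the rewrite author's own statement) =====
-- stated objective: alternative
-- what changed: Replaces A's stateful sweep that mutates two Counters with a closed-form per-position rule: a non-green position is 'Y' iff its left-to-right rank among the non-green occurrences of its letter in the guess is at most the word's non-green count of that letter.
import Mathlib
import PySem

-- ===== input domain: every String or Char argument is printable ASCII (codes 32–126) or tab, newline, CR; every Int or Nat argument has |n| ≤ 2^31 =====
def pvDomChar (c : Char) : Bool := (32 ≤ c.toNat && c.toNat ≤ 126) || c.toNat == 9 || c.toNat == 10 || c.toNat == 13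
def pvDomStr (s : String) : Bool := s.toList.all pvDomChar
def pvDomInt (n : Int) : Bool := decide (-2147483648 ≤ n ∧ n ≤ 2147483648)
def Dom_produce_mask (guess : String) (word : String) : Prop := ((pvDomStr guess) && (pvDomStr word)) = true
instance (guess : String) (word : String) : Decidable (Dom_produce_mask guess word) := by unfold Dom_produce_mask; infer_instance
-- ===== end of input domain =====

-- B replaces A's stateful two-Counter sweep with a closed-form per-position rule
-- (alternative decomposition, same return value on Pre_: word no longer than guess).

-- ===== PORT A =====
-- the loop state: (guess_word_mask, guess_letter_count, word_letter_count)
def pvStep1 (g : List Char) (st : List Char × PySem.Dict Char Int × PySem.Dict Char Int)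
    (p : Int × Char) : List Char × PySem.Dict Char Int × PySem.Dict Char Int :=
  if PySem.List.pyGetD g p.1 '\x00' == p.2 then
    (PySem.List.pySetD st.1 p.1 'G', st.2.1.modify p.2 0 (· - 1), st.2.2.modify p.2 0 (· - 1))
  else st

def pvStep2 (g : List Char) (st : List Char × PySem.Dict Char Int × PySem.Dict Char Int)
    (i : Nat) : List Char × PySem.Dict Char Int × PySem.Dict Char Int :=
  let letter := g.getD i '\x00'
  if st.1.getD i '\x00' == 'x' then
    if 0 < st.2.1.getD letter 0 ∧ 0 < st.2.2.getD letter 0 then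
      (st.1.set i 'Y', st.2.1.modify letter 0 (· - 1), st.2.2.modify letter 0 (· - 1))
    else (st.1.set i 'B', st.2.1, st.2.2)
  else st

def produce_mask (guess : String) (word : String) : String :=
  let g := guess.toList
  let w := word.toList
  let word_letter_count : PySem.Dict Char Int := PySem.Dict.counter w
  let guess_letter_count : PySem.Dict Char Int := PySem.Dict.counter g
  let guess_word_mask : List Char := List.replicate g.length 'x'
  let st1 := (PySem.List.enumerate w).foldl (pvStep1 g)
    (guess_word_mask, guess_letter_count, word_letter_count)
  let st2 := (List.range g.length).foldl (pvStep2 g) st1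
  String.ofList st2.1

-- ===== PORT B =====
def pvGreen (g w : List Char) (j : Nat) : Bool :=
  decide (j < w.length) && (g.getD j '\x00' == w.getD j '\x00')

def pvBudget (g w : List Char) (c : Char) : Nat :=
  ((List.range w.length).filter (fun j => w.getD j '\x00' == c && !pvGreen g w j)).length

def pvRank (g w : List Char) (c : Char) (i : Nat) : Nat :=
  ((List.range (i + 1)).filter (fun j => g.getD j '\x00' == c && !pvGreen g w j)).length

def pvOut (g w : List Char) (i : Nat) : Char :=
  if pvGreen g w i = true then 'G'
  else if pvRank g w (g.getD i '\x00') i ≤ pvBudget g w (g.getD i '\x00') then 'Y' else 'B'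

def produce_mask_alt (guess : String) (word : String) : String :=
  let g := guess.toList
  let w := word.toList
  String.ofList ((List.range g.length).map (pvOut g w))

-- ===== PRECONDITION & SPEC =====
-- Pre_ excludes exactly the inputs where A raises IndexError: a word longer than the guess.
def Pre_produce_mask (guess : String) (word : String) : Prop :=
  word.toList.length ≤ guess.toList.length
instance (guess : String) (word : String) : Decidable (Pre_produce_mask guess word) := by
  unfold Pre_produce_mask; infer_instance

def pvWitness_produce_mask : String × String := ("crane", "crate")

def Spec_produce_mask (guess : String) (word : String) (out : String) : Prop :=
  out = produce_mask_alt guess word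
instance (guess : String) (word : String) (out : String) : Decidable (Spec_produce_mask guess word out) := by
  unfold Spec_produce_mask; infer_instance

-- ===== CLAIM (what is proved, stated in full; the proofs are below) =====
def Claim_equal_produce_mask : Prop := ∀ (guess : String) (word : String),
  Dom_produce_mask guess word → Pre_produce_mask guess word →
  Spec_produce_mask guess word (produce_mask guess word)

-- ===== LEMMAS AND PROOFS =====

lemma getD_set_ne (l : List Char) {i j : Nat} (a d : Char) (h : i ≠ j) :
    (l.set i a).getD j d = l.getD j d := by
  simp [List.getD_eq_getElem?_getD, List.getElem?_set, h]

lemma getD_set_self (l : List Char) {i : Nat} (a d : Char) (h : i < l.length) :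
    (l.set i a).getD i d = a := by
  simp [List.getD_eq_getElem?_getD, h]

-- number of non-green occurrences of letter c among the first k guess positions
def pvNB (g w : List Char) (c : Char) (k : Nat) : Nat :=
  ((List.range k).filter (fun j => g.getD j '\x00' == c && !pvGreen g w j)).length

-- non-green occurrences of c in the whole guess
def pvNGG (g w : List Char) (c : Char) : Nat := pvNB g w c g.length

-- yellows the second loop has assigned to letter c among the first k positions
def pvY (g w : List Char) (c : Char) (k : Nat) : Nat :=
  ((List.range k).filter
    (fun j => g.getD j '\x00' == c && !pvGreen g w j
      && decide (pvNB g w c (j + 1) ≤ pvBudget g w c))).length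

-- green positions of letter c in the word from position k on
def pvGreens (g w : List Char) (c : Char) (k : Nat) : Nat :=
  ((List.range' k (w.length - k)).filter (fun j => w.getD j '\x00' == c && pvGreen g w j)).length

lemma pvRank_eq_NB (g w : List Char) (c : Char) (i : Nat) :
    pvRank g w c i = pvNB g w c (i + 1) := rfl

lemma pvNB_succ (g w : List Char) (c : Char) (k : Nat) :
    pvNB g w c (k + 1)
      = pvNB g w c k + (if g.getD k '\x00' = c ∧ pvGreen g w k = false then 1 else 0) := by
  unfold pvNB
  rw [List.range_succ, List.filter_append, List.length_append]
  congr 1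
  by_cases h1 : g.getD k '\x00' = c <;> by_cases h2 : pvGreen g w k = false <;>
    simp [h2] <;> simp_all

lemma pvY_succ (g w : List Char) (c : Char) (k : Nat) :
    pvY g w c (k + 1)
      = pvY g w c k + (if g.getD k '\x00' = c ∧ pvGreen g w k = false
          ∧ pvNB g w c (k + 1) ≤ pvBudget g w c then 1 else 0) := by
  unfold pvY
  rw [List.range_succ, List.filter_append, List.length_append]
  congr 1
  by_cases h1 : g.getD k '\x00' = c <;> by_cases h2 : pvGreen g w k = false <;>
    by_cases h3 : pvNB g w c (k + 1) ≤ pvBudget g w c <;>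
    simp [h2, h3] <;> simp_all

lemma pvNB_mono (g w : List Char) (c : Char) {k k' : Nat} (h : k ≤ k') :
    pvNB g w c k ≤ pvNB g w c k' := by
  induction k', h using Nat.le_induction with
  | base => exact le_rfl
  | succ n hn ih => rw [pvNB_succ]; split_ifs <;> omega

lemma pvY_eq_min (g w : List Char) (c : Char) (k : Nat) :
    pvY g w c k = min (pvNB g w c k) (pvBudget g w c) := by
  induction k with
  | zero => simp [pvY, pvNB]
  | succ n ih =>
    by_cases h1 : g.getD n '\x00' = c ∧ pvGreen g w n = false
    · have e1 : pvNB g w c (n + 1) = pvNB g w c n + 1 := by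
        rw [pvNB_succ, if_pos h1]
      rw [pvY_succ, ih, e1]
      by_cases h3 : pvNB g w c n + 1 ≤ pvBudget g w c
      · rw [if_pos ⟨h1.1, h1.2, h3⟩]; omega
      · rw [if_neg (by tauto)]; omega
    · have e1 : pvNB g w c (n + 1) = pvNB g w c n := by
        rw [pvNB_succ, if_neg h1, Nat.add_zero]
      rw [pvY_succ, ih, e1, if_neg (by tauto)]
      omega

lemma pvGreens_succ (g w : List Char) (c : Char) (k : Nat) (hk : k < w.length) :
    pvGreens g w c k
      = (if w.getD k '\x00' = c ∧ pvGreen g w k = true then 1 else 0) + pvGreens g w c (k + 1) := by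
  unfold pvGreens
  have e : w.length - k = (w.length - (k + 1)) + 1 := by omega
  rw [e, List.range'_succ, List.filter_cons]
  by_cases h1 : w.getD k '\x00' = c <;> by_cases h2 : pvGreen g w k = true <;>
    simp [h1, h2] <;> simp_all <;> omega

lemma pvGreens_stop (g w : List Char) (c : Char) (k : Nat) (hk : w.length ≤ k) :
    pvGreens g w c k = 0 := by
  unfold pvGreens
  rw [Nat.sub_eq_zero_of_le hk]
  simp

lemma filter_split (l : List Nat) (p q : Nat → Bool) :
    (l.filter p).length
      = (l.filter (fun x => p x && q x)).length + (l.filter (fun x => p x && !q x)).length := by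
  induction l with
  | nil => simp
  | cons x xs ih =>
    by_cases hp : p x <;> by_cases hq : q x <;> simp [hp, hq] <;> omega

lemma count_eq_range (l : List Char) (c : Char) :
    l.count c = ((List.range l.length).filter (fun j => l.getD j '\x00' == c)).length := by
  induction l using List.reverseRecOn with
  | nil => simp
  | append_singleton xs a ih =>
    rw [List.length_append, List.length_singleton, List.range_succ, List.filter_append,
      List.length_append, List.count_append]
    congr 1
    · rw [ih]
      congr 1
      apply List.filter_congr
      intro j hj
      rw [List.mem_range] at hj
      rw [List.getD_append _ _ _ _ hj]
    · have ha : (xs ++ [a]).getD xs.length '\x00' = a := by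
        simp [List.getD_eq_getElem?_getD]
      by_cases h : a = c <;> simp [ha, h]

lemma count_w_split (g w : List Char) (c : Char) :
    w.count c = pvGreens g w c 0 + pvBudget g w c := by
  rw [count_eq_range]
  unfold pvGreens pvBudget
  rw [Nat.sub_zero, ← List.range_eq_range']
  rw [filter_split (List.range w.length) (fun j => w.getD j '\x00' == c) (fun j => pvGreen g w j)]

lemma count_g_split (g w : List Char) (h : w.length ≤ g.length) (c : Char) :
    g.count c = pvGreens g w c 0 + pvNGG g w c := by
  rw [count_eq_range]
  rw [filter_split (List.range g.length) (fun j => g.getD j '\x00' == c) (fun j => pvGreen g w j)]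
  congr 1
  unfold pvGreens
  rw [Nat.sub_zero, ← List.range_eq_range']
  have hsplit : List.range g.length = List.range w.length ++ List.range' w.length (g.length - w.length) := by
    set d := g.length - w.length with hd
    rw [List.range_eq_range', show g.length = w.length + d from by omega, ← List.range'_append,
      List.range_eq_range']
    simp
  rw [hsplit, List.filter_append, List.length_append]
  have h2 : (List.range' w.length (g.length - w.length)).filter
      (fun j => g.getD j '\x00' == c && pvGreen g w j) = [] := by
    rw [List.filter_eq_nil_iff]
    intro j hj
    rw [List.mem_range'] at hj
    have hf : pvGreen g w j = false := by
      unfold pvGreen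
      simp only [Bool.and_eq_false_iff, decide_eq_false_iff_not]
      left
      omega
    simp [hf]
  rw [h2, List.length_nil, Nat.add_zero]
  apply congrArg
  apply List.filter_congr
  intro j hj
  rw [List.mem_range] at hj
  by_cases hgr : pvGreen g w j = true
  · have hgw : g.getD j '\x00' = w.getD j '\x00' := by
      unfold pvGreen at hgr
      rw [Bool.and_eq_true] at hgr
      exact beq_iff_eq.mp hgr.2
    simp only [List.getD_eq_getElem?_getD] at hgw
    simp [hgr, hgw]
  · rw [Bool.not_eq_true] at hgr
    simp [hgr]

lemma loop1_spec (g w : List Char) (h : w.length ≤ g.length) :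
    ∀ (n k : Nat), w.length - k = n →
    ∀ (m : List Char) (gc wc : PySem.Dict Char Int), m.length = g.length →
    ((((PySem.List.enumerate (w.drop k) (k : Int)).foldl (pvStep1 g) (m, gc, wc)).1.length = g.length)
    ∧ (∀ j d, (((PySem.List.enumerate (w.drop k) (k : Int)).foldl (pvStep1 g) (m, gc, wc)).1.getD j d
          = if k ≤ j ∧ pvGreen g w j = true then 'G' else m.getD j d))
    ∧ (∀ c, (((PySem.List.enumerate (w.drop k) (k : Int)).foldl (pvStep1 g) (m, gc, wc)).2.1.getD c 0
          = gc.getD c 0 - pvGreens g w c k))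
    ∧ (∀ c, (((PySem.List.enumerate (w.drop k) (k : Int)).foldl (pvStep1 g) (m, gc, wc)).2.2.getD c 0
          = wc.getD c 0 - pvGreens g w c k))) := by
  intro n
  induction n with
  | zero =>
    intro k hk m gc wc hm
    have hwk : w.length ≤ k := by omega
    rw [List.drop_of_length_le hwk, PySem.List.enumerate_nil, List.foldl_nil]
    refine ⟨hm, ?_, ?_, ?_⟩
    · intro j d
      rw [if_neg]
      rintro ⟨hkj, hgr⟩
      unfold pvGreen at hgr
      rw [Bool.and_eq_true, decide_eq_true_eq] at hgr
      omega
    · intro c; rw [pvGreens_stop g w c k hwk]; simp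
    · intro c; rw [pvGreens_stop g w c k hwk]; simp
  | succ n ih =>
    intro k hk m gc wc hm
    have hkw : k < w.length := by omega
    rw [List.drop_eq_getElem_cons hkw, PySem.List.enumerate_cons, List.foldl_cons,
      show ((k : Int) + 1) = (((k + 1 : Nat)) : Int) by push_cast; ring]
    have hwgd : w.getD k '\x00' = w[k] := List.getD_eq_getElem w '\x00' hkw
    have hgreen : pvGreen g w k = (g.getD k '\x00' == w[k]) := by
      unfold pvGreen
      rw [decide_eq_true hkw, Bool.true_and, hwgd]
    simp only [pvStep1, PySem.List.pyGetD_natCast, PySem.List.pySetD_natCast]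
    by_cases hb : (g.getD k '\x00' == w[k]) = true
    · rw [if_pos hb]
      have hgr : pvGreen g w k = true := by rw [hgreen]; exact hb
      obtain ⟨L, M, C1, C2⟩ := ih (k + 1) (by omega) (m.set k 'G')
        (gc.modify w[k] 0 (· - 1)) (wc.modify w[k] 0 (· - 1))
        (by rw [List.length_set]; exact hm)
      refine ⟨L, ?_, ?_, ?_⟩
      · intro j d
        rw [M j d]
        by_cases hj1 : k + 1 ≤ j ∧ pvGreen g w j = true
        · rw [if_pos hj1, if_pos ⟨by omega, hj1.2⟩]
        · rw [if_neg hj1]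
          by_cases hj2 : k ≤ j ∧ pvGreen g w j = true
          · have hjk : j = k := by
              rcases hj2 with ⟨h1, h2⟩
              by_contra hne
              exact hj1 ⟨by omega, h2⟩
            subst hjk
            rw [if_pos hj2, getD_set_self m 'G' d (by omega)]
          · rw [if_neg hj2]
            have hjk : j ≠ k := by
              intro e; subst e; exact hj2 ⟨le_refl _, hgr⟩
            rw [getD_set_ne m 'G' d (Ne.symm hjk)]
      · intro c
        rw [C1 c, PySem.Dict.getD_modify, pvGreens_succ g w c k hkw]
        by_cases hc : c = w[k]
        · rw [if_pos hc, if_pos ⟨by rw [hwgd, hc], hgr⟩, hc]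
          push_cast
          omega
        · rw [if_neg hc, if_neg (by rintro ⟨e, _⟩; exact hc ((hwgd.symm.trans e).symm))]
          omega
      · intro c
        rw [C2 c, PySem.Dict.getD_modify, pvGreens_succ g w c k hkw]
        by_cases hc : c = w[k]
        · rw [if_pos hc, if_pos ⟨by rw [hwgd, hc], hgr⟩, hc]
          push_cast
          omega
        · rw [if_neg hc, if_neg (by rintro ⟨e, _⟩; exact hc ((hwgd.symm.trans e).symm))]
          omega
    · rw [if_neg hb]
      have hgr : pvGreen g w k = false := by
        rw [hgreen, Bool.eq_false_iff]
        exact hb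
      obtain ⟨L, M, C1, C2⟩ := ih (k + 1) (by omega) m gc wc hm
      refine ⟨L, ?_, ?_, ?_⟩
      · intro j d
        rw [M j d]
        by_cases hj1 : k + 1 ≤ j ∧ pvGreen g w j = true
        · rw [if_pos hj1, if_pos ⟨by omega, hj1.2⟩]
        · rw [if_neg hj1, if_neg]
          rintro ⟨h1, h2⟩
          have hjk : j = k := by
            by_contra hne
            exact hj1 ⟨by omega, h2⟩
          subst hjk
          rw [h2] at hgr
          cases hgr
      · intro c
        rw [C1 c, pvGreens_succ g w c k hkw, if_neg (by rintro ⟨_, hgg⟩; rw [hgg] at hgr; cases hgr)]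
        omega
      · intro c
        rw [C2 c, pvGreens_succ g w c k hkw, if_neg (by rintro ⟨_, hgg⟩; rw [hgg] at hgr; cases hgr)]
        omega

lemma loop2_spec (g w : List Char) (h : w.length ≤ g.length) :
    ∀ (n k : Nat), g.length - k = n → k ≤ g.length →
    ∀ (m : List Char) (gc wc : PySem.Dict Char Int), m.length = g.length →
    (∀ j d, j < k → m.getD j d = pvOut g w j) →
    (∀ j d, k ≤ j → j < g.length → m.getD j d = (if pvGreen g w j = true then 'G' else 'x')) →
    (∀ c, gc.getD c 0 = (pvNGG g w c : Int) - pvY g w c k) →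
    (∀ c, wc.getD c 0 = (pvBudget g w c : Int) - pvY g w c k) →
    ((((List.range' k (g.length - k)).foldl (pvStep2 g) (m, gc, wc)).1.length = g.length)
    ∧ ∀ j d, j < g.length →
        (((List.range' k (g.length - k)).foldl (pvStep2 g) (m, gc, wc)).1.getD j d = pvOut g w j)) := by
  intro n
  induction n with
  | zero =>
    intro k hk hkle m gc wc hm Hpre Hsuf Hgc Hwc
    rw [hk, List.range'_zero, List.foldl_nil]
    exact ⟨hm, fun j d hj => Hpre j d (by omega)⟩
  | succ n ih =>
    intro k hk hkle m gc wc hm Hpre Hsuf Hgc Hwc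
    have hkg : k < g.length := by omega
    rw [hk, List.range'_succ, List.foldl_cons, show n = g.length - (k + 1) from by omega]
    have hmk : ∀ d, m.getD k d = (if pvGreen g w k = true then 'G' else 'x') :=
      fun d => Hsuf k d le_rfl hkg
    by_cases hgr : pvGreen g w k = true
    · -- green position: mask is 'G' ≠ 'x', the step leaves the state unchanged
      have hstep : pvStep2 g (m, gc, wc) k = (m, gc, wc) := by
        simp only [pvStep2]
        rw [hmk '\x00', if_pos hgr, if_neg (by decide)]
      rw [hstep]
      refine ih (k + 1) (by omega) (by omega) m gc wc hm ?_ ?_ ?_ ?_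
      · intro j d hj
        by_cases hjk : j = k
        · subst hjk
          rw [hmk d, if_pos hgr]
          unfold pvOut
          rw [if_pos hgr]
        · exact Hpre j d (by omega)
      · intro j d hj1 hj2
        exact Hsuf j d (by omega) hj2
      · intro c
        rw [Hgc c, pvY_succ, if_neg (by rintro ⟨_, hgg, _⟩; rw [hgr] at hgg; cases hgg)]
        omega
      · intro c
        rw [Hwc c, pvY_succ, if_neg (by rintro ⟨_, hgg, _⟩; rw [hgr] at hgg; cases hgg)]
        omega
    · rw [Bool.not_eq_true] at hgr
      have hNB1 : pvNB g w (g.getD k '\x00') (k + 1) = pvNB g w (g.getD k '\x00') k + 1 := by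
        rw [pvNB_succ, if_pos ⟨rfl, hgr⟩]
      have hmono : pvNB g w (g.getD k '\x00') (k + 1) ≤ pvNGG g w (g.getD k '\x00') :=
        pvNB_mono g w _ (by omega)
      have hYk := pvY_eq_min g w (g.getD k '\x00') k
      have hminle : min (pvNB g w (g.getD k '\x00') k) (pvBudget g w (g.getD k '\x00'))
          ≤ pvNB g w (g.getD k '\x00') k := min_le_left _ _
      have hgcpos : 0 < gc.getD (g.getD k '\x00') 0 := by
        rw [Hgc _, hYk]; omega
      by_cases hYY : pvNB g w (g.getD k '\x00') (k + 1) ≤ pvBudget g w (g.getD k '\x00')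
      · -- yellow
        have hwcpos : 0 < wc.getD (g.getD k '\x00') 0 := by
          rw [Hwc _, hYk]; omega
        have hstep : pvStep2 g (m, gc, wc) k
            = (m.set k 'Y', gc.modify (g.getD k '\x00') 0 (· - 1),
               wc.modify (g.getD k '\x00') 0 (· - 1)) := by
          simp only [pvStep2]
          have hmx : m.getD k '\x00' = 'x' := by rw [hmk '\x00', hgr]; simp
          rw [hmx, if_pos (show (('x' : Char) == 'x') = true from rfl), if_pos ⟨hgcpos, hwcpos⟩]
        rw [hstep]
        refine ih (k + 1) (by omega) (by omega) _ _ _ (by rw [List.length_set]; exact hm) ?_ ?_ ?_ ?_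
        · intro j d hj
          by_cases hjk : j = k
          · subst hjk
            rw [getD_set_self m 'Y' d (by omega)]
            unfold pvOut
            rw [if_neg (by rw [hgr]; decide), if_pos (by rw [pvRank_eq_NB]; exact hYY)]
          · rw [getD_set_ne m 'Y' d (Ne.symm hjk)]
            exact Hpre j d (by omega)
        · intro j d hj1 hj2
          rw [getD_set_ne m 'Y' d (by omega)]
          exact Hsuf j d (by omega) hj2
        · intro c
          rw [PySem.Dict.getD_modify, Hgc c, pvY_succ]
          by_cases hc : c = g.getD k '\x00'
          · rw [if_pos hc, if_pos ⟨hc.symm, hgr, by rw [hc]; exact hYY⟩, Hgc _, hc]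
            omega
          · rw [if_neg hc, if_neg (by rintro ⟨e, _⟩; exact hc e.symm)]
            omega
        · intro c
          rw [PySem.Dict.getD_modify, Hwc c, pvY_succ]
          by_cases hc : c = g.getD k '\x00'
          · rw [if_pos hc, if_pos ⟨hc.symm, hgr, by rw [hc]; exact hYY⟩, Hwc _, hc]
            omega
          · rw [if_neg hc, if_neg (by rintro ⟨e, _⟩; exact hc e.symm)]
            omega
      · -- black: the word counter for this letter is exhausted
        have hwczero : ¬ (0 < gc.getD (g.getD k '\x00') 0 ∧ 0 < wc.getD (g.getD k '\x00') 0) := by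
          rintro ⟨_, hw⟩
          rw [Hwc _, hYk] at hw
          have hminB : min (pvNB g w (g.getD k '\x00') k) (pvBudget g w (g.getD k '\x00'))
              = pvBudget g w (g.getD k '\x00') := by omega
          omega
        have hstep : pvStep2 g (m, gc, wc) k = (m.set k 'B', gc, wc) := by
          simp only [pvStep2]
          have hmx : m.getD k '\x00' = 'x' := by rw [hmk '\x00', hgr]; simp
          rw [hmx, if_pos (show (('x' : Char) == 'x') = true from rfl), if_neg hwczero]
        rw [hstep]
        refine ih (k + 1) (by omega) (by omega) _ _ _ (by rw [List.length_set]; exact hm) ?_ ?_ ?_ ?_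
        · intro j d hj
          by_cases hjk : j = k
          · subst hjk
            rw [getD_set_self m 'B' d (by omega)]
            unfold pvOut
            rw [if_neg (by rw [hgr]; decide), if_neg (by rw [pvRank_eq_NB]; exact hYY)]
          · rw [getD_set_ne m 'B' d (Ne.symm hjk)]
            exact Hpre j d (by omega)
        · intro j d hj1 hj2
          rw [getD_set_ne m 'B' d (by omega)]
          exact Hsuf j d (by omega) hj2
        · intro c
          rw [Hgc c, pvY_succ]
          rw [if_neg (by rintro ⟨e, _, hle⟩; rw [e] at hYY; exact hYY hle)]
          omega
        · intro c
          rw [Hwc c, pvY_succ]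
          rw [if_neg (by rintro ⟨e, _, hle⟩; rw [e] at hYY; exact hYY hle)]
          omega

-- ===== VERDICT (by name: the statement is the Claim_ definition above) =====
theorem produce_mask_spec : Claim_equal_produce_mask := by
  intro guess word hD hP
  have h : word.toList.length ≤ guess.toList.length := hP
  unfold Spec_produce_mask
  simp only [produce_mask, produce_mask_alt]
  apply congrArg String.ofList
  obtain ⟨L1, M1, C1, C2⟩ := loop1_spec guess.toList word.toList h word.toList.length 0 (by omega)
    (List.replicate guess.toList.length 'x') (PySem.Dict.counter guess.toList)
    (PySem.Dict.counter word.toList) (by rw [List.length_replicate])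
  rw [List.drop_zero, Nat.cast_zero] at L1 M1 C1 C2
  have Hsuf : ∀ j d, 0 ≤ j → j < guess.toList.length →
      ((PySem.List.enumerate word.toList 0).foldl (pvStep1 guess.toList)
        (List.replicate guess.toList.length 'x', PySem.Dict.counter guess.toList,
         PySem.Dict.counter word.toList)).1.getD j d
      = (if pvGreen guess.toList word.toList j = true then 'G' else 'x') := by
    intro j d hj1 hj2
    rw [M1 j d]
    by_cases hgr : pvGreen guess.toList word.toList j = true
    · rw [if_pos ⟨hj1, hgr⟩, if_pos hgr]
    · rw [if_neg (by tauto), if_neg hgr]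
      simp only [List.getD_eq_getElem?_getD, List.getElem?_replicate]
      split <;> simp_all
  have HY0 : ∀ c, pvY guess.toList word.toList c 0 = 0 := by intro c; simp [pvY]
  have Hgc : ∀ c, ((PySem.List.enumerate word.toList 0).foldl (pvStep1 guess.toList)
        (List.replicate guess.toList.length 'x', PySem.Dict.counter guess.toList,
         PySem.Dict.counter word.toList)).2.1.getD c 0
      = (pvNGG guess.toList word.toList c : Int) - pvY guess.toList word.toList c 0 := by
    intro c
    rw [C1 c, PySem.Dict.getD_counter, HY0 c]
    have hs := count_g_split guess.toList word.toList h c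
    omega
  have Hwc : ∀ c, ((PySem.List.enumerate word.toList 0).foldl (pvStep1 guess.toList)
        (List.replicate guess.toList.length 'x', PySem.Dict.counter guess.toList,
         PySem.Dict.counter word.toList)).2.2.getD c 0
      = (pvBudget guess.toList word.toList c : Int) - pvY guess.toList word.toList c 0 := by
    intro c
    rw [C2 c, PySem.Dict.getD_counter, HY0 c]
    have hs := count_w_split guess.toList word.toList c
    omega
  obtain ⟨L2, M2⟩ := loop2_spec guess.toList word.toList h guess.toList.length 0 (by omega)
    (by omega) _ _ _ L1 (fun j d hj => absurd hj (by omega)) Hsuf Hgc Hwc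
  rw [Nat.sub_zero, ← List.range_eq_range'] at L2 M2
  apply List.ext_getElem
  · rw [L2, List.length_map, List.length_range]
  · intro i h1 h2
    simp only [List.getElem_map, List.getElem_range]
    rw [← List.getD_eq_getElem _ '\x00' h1]
    exact M2 i '\x00' (by rw [← L2]; exact h1)
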